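-- pv_equiv track=rewrite | github.com/asgard-lab/driver | mech_datacom.py | _ports_to_dict
-- ===== SOURCE A (Python) =====
-- def _ports_to_dict(port_list):
--     """ takes a list of ports and returns a dictionary containing the
--     dictionary in a way dcclient understands.
--     """
--     update_interfaces = {}
--
--     for switch, interface in port_list:
--         switch = str(switch)
--         interface = int(interface)
--         if switch not in update_interfaces:
--             update_interfaces[switch] = []
--         update_interfaces[switch].append(interface)
--
--     return update_interfaces
-- ===== SOURCE B (Python) =====
-- def _ports_to_dict(port_list):
--     """Two-pass variant: first collect the switches in first-occurrence
--     order, then build each entry with one filtering comprehension."""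
--     keys = []
--     for switch, _interface in port_list:
--         s = str(switch)
--         if s not in keys:
--             keys.append(s)
--     return {s: [int(interface) for switch, interface in port_list
--                 if str(switch) == s]
--             for s in keys}
-- ===== Notes on version B (the rewrite author's own statement) =====
-- stated objective: alternative
-- what changed: Replaces the single-pass dict accumulation (setdefault-then-append) with two passes: an ordered dedup of the switch names followed by a per-key filtering comprehension building each group directly.
import Mathlib
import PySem

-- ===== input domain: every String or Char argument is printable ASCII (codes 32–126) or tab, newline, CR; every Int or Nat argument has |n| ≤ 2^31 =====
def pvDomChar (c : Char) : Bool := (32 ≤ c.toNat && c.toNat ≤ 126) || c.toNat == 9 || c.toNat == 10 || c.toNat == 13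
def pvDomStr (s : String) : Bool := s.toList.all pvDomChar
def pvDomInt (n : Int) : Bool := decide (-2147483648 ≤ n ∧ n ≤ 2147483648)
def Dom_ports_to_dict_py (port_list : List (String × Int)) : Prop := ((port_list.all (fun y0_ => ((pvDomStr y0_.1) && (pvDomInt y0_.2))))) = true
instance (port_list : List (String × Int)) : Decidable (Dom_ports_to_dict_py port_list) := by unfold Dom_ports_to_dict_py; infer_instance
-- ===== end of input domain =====

-- B groups by a two-pass scheme (ordered dedup of keys, then a filter per key) instead of
-- A's single-pass dict accumulation; same return value (alternative decomposition, not faster).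

-- ===== PORT A =====
-- for switch, interface in port_list: if switch not in d: d[switch] = []; d[switch].append(interface)
def ports_to_dict_py (port_list : List (String × Int)) : List (String × List Int) :=
  (port_list.foldl
    (fun (d : PySem.Dict String (List Int)) p =>
      let d' := if d.contains p.1 then d else d.insert p.1 []
      d'.modify p.1 [] (fun l => l ++ [p.2]))
    PySem.Dict.empty).items

-- ===== PORT B =====
-- keys = first-occurrence dedup of the switch names (a Python list grown with 'not in'/append = PySem.Set.add)
def ports_to_dict_py_alt (port_list : List (String × Int)) : List (String × List Int) :=
  let keys : PySem.Set String := port_list.foldl (fun ks p => PySem.Set.add ks p.1) PySem.Set.empty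
  keys.map (fun s => (s, (port_list.filter (fun p => p.1 == s)).map (·.2)))

-- ===== PRECONDITION & SPEC =====
def Spec_ports_to_dict_py (port_list : List (String × Int)) (out : List (String × List Int)) : Prop := out = ports_to_dict_py_alt port_list
instance (port_list : List (String × Int)) (out : List (String × List Int)) : Decidable (Spec_ports_to_dict_py port_list out) := by unfold Spec_ports_to_dict_py; infer_instance

-- ===== CLAIM (what is proved, stated in full; the proofs are below) =====
def Claim_equal_ports_to_dict_py : Prop := ∀ (port_list : List (String × Int)), Dom_ports_to_dict_py port_list → Spec_ports_to_dict_py port_list (ports_to_dict_py port_list)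

-- ===== LEMMAS AND PROOFS =====

-- A's "ensure key exists, then append" step is exactly 'modify with default []'.
theorem stepA_eq_modify (d : PySem.Dict String (List Int)) (p : String × Int) :
    (let d' := if d.contains p.1 then d else d.insert p.1 []
     d'.modify p.1 [] (fun l => l ++ [p.2]))
    = d.modify p.1 [] (fun l => l ++ [p.2]) := by
  by_cases h : d.contains p.1 = true
  · simp [h]
  · have hc : d.contains p.1 = false := by simpa using h
    have hg : d.getD p.1 [] = [] := PySem.Dict.getD_of_not_contains d [] hc
    simp only [hc, PySem.Dict.modify, if_false, Bool.false_eq_true,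
      PySem.Dict.getD_insert_self, PySem.Dict.insert_insert_self, hg]

theorem foldl_A_eq_modify (port_list : List (String × Int)) :
    port_list.foldl
      (fun (d : PySem.Dict String (List Int)) p =>
        let d' := if d.contains p.1 then d else d.insert p.1 []
        d'.modify p.1 [] (fun l => l ++ [p.2]))
      PySem.Dict.empty
    = port_list.foldl (fun d p => d.modify p.1 [] (fun l => l ++ [p.2])) PySem.Dict.empty := by
  exact PySem.List.foldl_congr_mem _ _ _ _ (fun d p _ => stepA_eq_modify d p)

-- ===== VERDICT (by name: the statement is the Claim_ definition above) =====
theorem ports_to_dict_py_spec : Claim_equal_ports_to_dict_py := by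
  intro port_list _
  show ports_to_dict_py port_list = ports_to_dict_py_alt port_list
  unfold ports_to_dict_py ports_to_dict_py_alt
  rw [foldl_A_eq_modify]
  set D := port_list.foldl (fun d p => d.modify p.1 [] (fun l => l ++ [p.2])) PySem.Dict.empty with hD
  have hkeys : D.keys = port_list.foldl (fun ks p => PySem.Set.add ks p.1) PySem.Set.empty := by
    rw [hD, PySem.Dict.keys_foldl_modify_key, ← PySem.Set.update_map_eq_foldl_add]
    simp [PySem.Dict.keys_empty, PySem.Set.empty]
  have hnd : D.keys.Nodup := by
    rw [hD]
    exact PySem.Dict.nodup_keys_foldl_modify_key _ _ _ _ _ (by simp [PySem.Dict.keys_empty])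
  rw [PySem.Dict.items_eq_map_keys D hnd [], hkeys]
  apply List.map_congr_left
  intro s _
  have := PySem.Dict.getD_foldl_modify_append (d := PySem.Dict.empty) (l := port_list) (c := s)
  simp only [hD, this, PySem.Dict.getD_empty, List.nil_append]
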